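-- pv_equiv track=rewrite | github.com/HackBulgaria/Programming0-1 | week5/2-Course-Status/solution/budget.py | status_count
-- ===== SOURCE A (Python) =====
-- def status_count(students):
--     result = {
--       "finalized": [],
--       "not_finalized": []
--     }
--
--     for student in students:
--         if student["status"] == "finalized":
--             result["finalized"] += [student["name"]]
--         elif student["status"] == "not_finalized":
--             result["not_finalized"] += [student["name"]]
--
--     return result
-- ===== SOURCE B (Python) =====
-- def status_count(students):
--     # Divide and conquer: split the list in half, solve each half recursively,
--     # and merge by concatenating the per-status buckets.
--     def solve(xs):
--         if len(xs) == 0: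
--             return {"finalized": [], "not_finalized": []}
--         if len(xs) == 1:
--             s = xs[0]
--             r = {"finalized": [], "not_finalized": []}
--             if s["status"] in r:
--                 r[s["status"]] = [s["name"]]
--             return r
--         mid = len(xs) // 2
--         left = solve(xs[:mid])
--         right = solve(xs[mid:])
--         return {k: left[k] + right[k] for k in left}
--     return solve(students)
-- ===== Notes on version B (the rewrite author's own statement) =====
-- stated objective: alternative
-- what changed: Replaces A's single accumulating loop over a pre-seeded mutable dict with a divide-and-conquer recursion: split the student list in half, solve each half, and merge the two bucket dicts by concatenation.
import Mathlib
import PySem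

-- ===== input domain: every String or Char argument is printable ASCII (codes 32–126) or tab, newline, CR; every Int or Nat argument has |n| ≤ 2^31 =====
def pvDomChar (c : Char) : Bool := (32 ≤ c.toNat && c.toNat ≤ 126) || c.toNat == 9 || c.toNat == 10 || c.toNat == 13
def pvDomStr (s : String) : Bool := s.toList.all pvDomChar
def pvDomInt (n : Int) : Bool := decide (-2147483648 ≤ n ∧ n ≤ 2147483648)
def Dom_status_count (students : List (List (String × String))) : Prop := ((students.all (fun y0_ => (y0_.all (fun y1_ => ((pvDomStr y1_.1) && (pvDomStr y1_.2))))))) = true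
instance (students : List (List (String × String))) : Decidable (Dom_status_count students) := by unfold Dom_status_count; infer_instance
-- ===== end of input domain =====

-- B replaces A's single accumulating loop over a pre-seeded mutable dict with a
-- divide-and-conquer recursion: split the list in half, solve each half, merge buckets.

-- ===== PORT A =====
-- one loop over students, appending to the matching bucket of a pre-seeded dict
def status_count (students : List (List (String × String))) : List (String × List String) :=
  let result : PySem.Dict String (List String) :=
    (PySem.Dict.empty.insert "finalized" []).insert "not_finalized" []
  (students.foldl (fun result student =>
      let d := PySem.Dict.mk student
      if (d.get? "status").getD "" == "finalized" then
        result.modify "finalized" [] (fun l => l ++ [(d.get? "name").getD ""])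
      else if (d.get? "status").getD "" == "not_finalized" then
        result.modify "not_finalized" [] (fun l => l ++ [(d.get? "name").getD ""])
      else result) result).items

-- ===== PORT B =====
-- divide and conquer: solve(xs) of Source B; xs[:mid] / xs[mid:] with 0 ≤ mid ≤ len are
-- exactly List.take mid / List.drop mid; the dict comprehension {k: left[k]+right[k]
-- for k in left} is the map over left.keys (right always has both keys, so the
-- lookup right[k] never raises; ported as get? … .getD []).
def scSolve : List (List (String × String)) → PySem.Dict String (List String)
  | [] => PySem.Dict.mk [("finalized", []), ("not_finalized", [])]
  | [s] =>
    let d := PySem.Dict.mk s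
    let r : PySem.Dict String (List String) :=
      PySem.Dict.mk [("finalized", []), ("not_finalized", [])]
    if r.contains ((d.get? "status").getD "") then
      r.insert ((d.get? "status").getD "") [(d.get? "name").getD ""]
    else r
  | a :: b :: t =>
    let xs := a :: b :: t
    let mid := xs.length / 2
    let left := scSolve (xs.take mid)
    let right := scSolve (xs.drop mid)
    PySem.Dict.mk (left.keys.map (fun k =>
      (k, (left.get? k).getD [] ++ (right.get? k).getD [])))
  termination_by xs => xs.length
  decreasing_by all_goals (simp [List.length_take, List.length_drop]; omega)

def status_count_alt (students : List (List (String × String))) : List (String × List String) :=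
  (scSolve students).items

-- ===== PRECONDITION & SPEC =====
-- Pre_ excludes exactly the inputs where the Python raises KeyError (in A and in B alike):
-- a student without a "status" key, or a student whose status is "finalized"/"not_finalized"
-- but who has no "name" key.
def Pre_status_count (students : List (List (String × String))) : Prop :=
  ∀ s ∈ students,
    ((PySem.Dict.mk s).get? "status").isSome = true ∧
    (((PySem.Dict.mk s).get? "status" = some "finalized" ∨
      (PySem.Dict.mk s).get? "status" = some "not_finalized") →
      ((PySem.Dict.mk s).get? "name").isSome = true)
instance (students : List (List (String × String))) : Decidable (Pre_status_count students) := by unfold Pre_status_count; infer_instance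
def pvWitness_status_count : (List (List (String × String))) :=
  [[("status", "finalized"), ("name", "Ann")], [("status", "other")],
   [("status", "not_finalized"), ("name", "Bob")]]
def Spec_status_count (students : List (List (String × String))) (out : List (String × List String)) : Prop := out = status_count_alt students
instance (students : List (List (String × String))) (out : List (String × List String)) : Decidable (Spec_status_count students out) := by unfold Spec_status_count; infer_instance

-- ===== CLAIM (what is proved, stated in full; the proofs are below) =====
def Claim_equal_status_count : Prop := ∀ (students : List (List (String × String))), Dom_status_count students → Pre_status_count students → Spec_status_count students (status_count students)

-- ===== LEMMAS AND PROOFS =====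

-- the loop body of A, named for the invariant lemma
def pvStepA (result : PySem.Dict String (List String)) (student : List (String × String)) :
    PySem.Dict String (List String) :=
  let d := PySem.Dict.mk student
  if (d.get? "status").getD "" == "finalized" then
    result.modify "finalized" [] (fun l => l ++ [(d.get? "name").getD ""])
  else if (d.get? "status").getD "" == "not_finalized" then
    result.modify "not_finalized" [] (fun l => l ++ [(d.get? "name").getD ""])
  else result

def pvPick (v : String) (s : List (String × String)) : Option String :=
  let d := PySem.Dict.mk s
  if (d.get? "status").getD "" == v then some ((d.get? "name").getD "") else none

lemma pvStepA_eq (a b : List String) (s : List (String × String)) :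
    pvStepA (PySem.Dict.mk [("finalized", a), ("not_finalized", b)]) s =
      PySem.Dict.mk [("finalized", a ++ (pvPick "finalized" s).toList),
                     ("not_finalized", b ++ (pvPick "not_finalized" s).toList)] := by
  unfold pvStepA pvPick
  by_cases h1 : ((PySem.Dict.mk s).get? "status").getD "" == "finalized"
  · have h2 : ¬ (((PySem.Dict.mk s).get? "status").getD "" == "not_finalized") := by
      simp_all
    simp only [h1, h2, if_pos, Bool.false_eq_true, if_false, Option.toList_some,
      Option.toList_none, List.append_nil]
    rfl
  · simp only [h1, Bool.false_eq_true, if_false]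
    by_cases h2 : ((PySem.Dict.mk s).get? "status").getD "" == "not_finalized"
    · simp only [h2, if_pos, Option.toList_some, Option.toList_none, List.append_nil]
      rfl
    · simp only [h2, Bool.false_eq_true, if_false, Option.toList_none,
        List.append_nil]

lemma pvFold_inv (students : List (List (String × String))) (a b : List String) :
    students.foldl pvStepA (PySem.Dict.mk [("finalized", a), ("not_finalized", b)]) =
      PySem.Dict.mk [("finalized", a ++ students.filterMap (pvPick "finalized")),
                     ("not_finalized", b ++ students.filterMap (pvPick "not_finalized"))] := by
  induction students generalizing a b with
  | nil => simp
  | cons s rest ih =>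
    rw [List.foldl_cons, pvStepA_eq, ih]
    cases hf : pvPick "finalized" s <;> cases hn : pvPick "not_finalized" s <;>
      simp [hf, hn]

-- characterisation of B's divide-and-conquer recursion
set_option maxRecDepth 4000 in
lemma scSolve_eq (xs : List (List (String × String))) :
    scSolve xs =
      PySem.Dict.mk [("finalized", xs.filterMap (pvPick "finalized")),
                     ("not_finalized", xs.filterMap (pvPick "not_finalized"))] := by
  induction xs using scSolve.induct with
  | case1 => rw [scSolve]; rfl
  | case2 s d r h =>
    rw [scSolve]
    have hv0 : "finalized" = ((PySem.Dict.mk s).get? "status").getD "" ∨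
        "not_finalized" = ((PySem.Dict.mk s).get? "status").getD "" := by
      simp only [d, r] at h
      simpa [PySem.Dict.contains] using h
    have hv : ((PySem.Dict.mk s).get? "status").getD "" = "finalized" ∨
        ((PySem.Dict.mk s).get? "status").getD "" = "not_finalized" :=
      hv0.imp Eq.symm Eq.symm
    rcases hv with hv | hv <;>
    · rw [if_pos (by simp [PySem.Dict.contains, hv]), hv]
      apply PySem.Dict.ext
      rw [PySem.Dict.items_insert_of_contains _ _ (by decide)]
      simp [pvPick, hv]
  | case3 s d r h =>
    rw [scSolve]
    have h1 : ¬ ((PySem.Dict.mk s).get? "status").getD "" = "finalized" := by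
      intro hc
      apply h
      show (PySem.Dict.mk [("finalized", ([] : List String)), ("not_finalized", [])]).contains
        (((PySem.Dict.mk s).get? "status").getD "") = true
      rw [hc]; decide
    have h2 : ¬ ((PySem.Dict.mk s).get? "status").getD "" = "not_finalized" := by
      intro hc
      apply h
      show (PySem.Dict.mk [("finalized", ([] : List String)), ("not_finalized", [])]).contains
        (((PySem.Dict.mk s).get? "status").getD "") = true
      rw [hc]; decide
    simp [PySem.Dict.contains, pvPick, h1, h2, Ne.symm h1, Ne.symm h2]
  | case4 a b t xs mid ihT ihD =>
    rw [scSolve]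
    simp only at ihT ihD
    rw [ihT, ihD]
    have hsplit := List.take_append_drop ((a :: b :: t).length / 2) (a :: b :: t)
    simp [PySem.Dict.keys, PySem.Dict.get?]
    constructor <;> (rw [← List.filterMap_append]; exact congrArg _ hsplit)

-- ===== VERDICT (by name: the statement is the Claim_ definition above) =====
theorem status_count_spec : Claim_equal_status_count := by
  intro students _ _
  show status_count students = status_count_alt students
  unfold status_count status_count_alt
  rw [scSolve_eq]
  show (students.foldl pvStepA
      (PySem.Dict.mk [("finalized", []), ("not_finalized", [])])).items = _
  rw [pvFold_inv]
  simp
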